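-- pv_equiv track=rewrite | github.com/adpunt/KIRBy | src/kirby/representations/sequence.py | _clean_sequence
-- ===== SOURCE A (Python) =====
-- DNA_ALPHABET = set('ACGT')
--
-- def _clean_sequence(seq: str, alphabet: set = DNA_ALPHABET, replace_char: str = 'N') -> str:
--     """Clean sequence by replacing invalid characters."""
--     seq = seq.upper()
--     cleaned = []
--     for char in seq:
--         if char in alphabet or char == replace_char:
--             cleaned.append(char)
--         elif char in 'ACGTU':
--             # Handle T/U conversion
--             if 'U' in alphabet and char == 'T':
--                 cleaned.append('U')
--             elif 'T' in alphabet and char == 'U':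
--                 cleaned.append('T')
--             else:
--                 cleaned.append(char)
--         else:
--             cleaned.append(replace_char)
--     return ''.join(cleaned)
-- ===== SOURCE B (Python) =====
-- DNA_ALPHABET = set('ACGT')
--
--
-- def _map_char(c, alphabet, replace_char):
--     """Image of one character under the cleaning map."""
--     if c in alphabet or c == replace_char:
--         return c
--     if c == 'T' and 'U' in alphabet:
--         return 'U'
--     if c == 'U' and 'T' in alphabet:
--         return 'T'
--     if c in 'ACGTU':
--         return c
--     return replace_char
--
--
-- def _clean_sequence(seq: str, alphabet: set = DNA_ALPHABET, replace_char: str = 'N') -> str: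
--     """Clean sequence by run-length grouping: decide once per maximal run of
--     equal characters and emit the mapped character multiplied by the run length."""
--     s = seq.upper()
--     pieces = []
--     i, n = 0, len(s)
--     while i < n:
--         j = i + 1
--         while j < n and s[j] == s[i]:
--             j += 1
--         pieces.append(_map_char(s[i], alphabet, replace_char) * (j - i))
--         i = j
--     return ''.join(pieces)
-- ===== Notes on version B (the rewrite author's own statement) =====
-- stated objective: alternative
-- what changed: B replaces A's per-character append loop by run-length grouping: it scans the uppercased sequence for maximal runs of equal characters, decides the mapping once per run, and emits the mapped character multiplied by the run length.
import Mathlib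
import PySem

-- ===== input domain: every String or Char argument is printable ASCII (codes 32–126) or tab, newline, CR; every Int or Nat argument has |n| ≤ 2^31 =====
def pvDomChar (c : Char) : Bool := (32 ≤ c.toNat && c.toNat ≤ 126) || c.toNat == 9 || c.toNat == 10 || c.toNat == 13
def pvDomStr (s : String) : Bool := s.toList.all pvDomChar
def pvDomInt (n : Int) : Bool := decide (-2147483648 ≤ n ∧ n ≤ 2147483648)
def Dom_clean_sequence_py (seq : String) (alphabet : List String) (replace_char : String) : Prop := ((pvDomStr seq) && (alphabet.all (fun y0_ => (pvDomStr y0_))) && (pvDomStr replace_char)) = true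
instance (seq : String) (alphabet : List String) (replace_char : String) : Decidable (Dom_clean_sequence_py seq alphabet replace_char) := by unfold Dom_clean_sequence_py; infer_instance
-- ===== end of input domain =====

-- B cleans the sequence by run-length grouping (one decision per maximal run of equal
-- characters, emitted with string multiplication) instead of A's per-character cascade
-- (same return value; objective: alternative algorithm).

-- ===== PORT A =====
def clean_sequence_py (seq : String) (alphabet : List String) (replace_char : String) : String :=
  let sequ := PySem.Str.upper seq
  let cleaned : List String := sequ.toList.foldl (fun cleaned char =>
    let ch : String := String.ofList [char]
    if alphabet.contains ch || ch == replace_char then cleaned ++ [ch]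
    else if PySem.Str.isIn ch "ACGTU" then
      if alphabet.contains "U" && ch == "T" then cleaned ++ ["U"]
      else if alphabet.contains "T" && ch == "U" then cleaned ++ ["T"]
      else cleaned ++ [ch]
    else cleaned ++ [replace_char]) []
  PySem.Str.join "" cleaned

-- ===== PORT B =====
-- Source B's _map_char: the image of one character under the cleaning map
def pvMapChar (alphabet : List String) (replace_char : String) (c : Char) : String :=
  let ch : String := String.ofList [c]
  if alphabet.contains ch || ch == replace_char then ch
  else if ch == "T" && alphabet.contains "U" then "U"
  else if ch == "U" && alphabet.contains "T" then "T"
  else if PySem.Str.isIn ch "ACGTU" then ch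
  else replace_char

-- Python's  s * k  for k ≥ 0
def pvStrMul (s : String) (k : Nat) : String := String.ofList ((List.replicate k s.toList).flatten)

-- Source B's outer while loop: split off the maximal run starting at the head (the inner
-- while j loop is the run scan = takeWhile/dropWhile), emit mapped-char * run-length
def pvRuns (alphabet : List String) (replace_char : String) : List Char → List String
  | [] => []
  | c :: rest =>
      pvStrMul (pvMapChar alphabet replace_char c) (1 + (rest.takeWhile (fun d => d == c)).length)
        :: pvRuns alphabet replace_char (rest.dropWhile (fun d => d == c))
  termination_by l => l.length
  decreasing_by
    simpa using Nat.lt_succ_of_le (List.length_dropWhile_le _ _)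

def clean_sequence_py_alt (seq : String) (alphabet : List String) (replace_char : String) : String :=
  PySem.Str.join "" (pvRuns alphabet replace_char (PySem.Str.upper seq).toList)

-- ===== PRECONDITION & SPEC =====
def Spec_clean_sequence_py (seq : String) (alphabet : List String) (replace_char : String) (out : String) : Prop := out = clean_sequence_py_alt seq alphabet replace_char
instance (seq : String) (alphabet : List String) (replace_char : String) (out : String) : Decidable (Spec_clean_sequence_py seq alphabet replace_char out) := by unfold Spec_clean_sequence_py; infer_instance

-- ===== CLAIM (what is proved, stated in full; the proofs are below) =====
def Claim_equal_clean_sequence_py : Prop := ∀ (seq : String) (alphabet : List String) (replace_char : String), Dom_clean_sequence_py seq alphabet replace_char → Spec_clean_sequence_py seq alphabet replace_char (clean_sequence_py seq alphabet replace_char)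

-- ===== LEMMAS AND PROOFS =====

-- the element A's loop appends for one character
def pvGA (alphabet : List String) (replace_char : String) (char : Char) : String :=
  let ch : String := String.ofList [char]
  if alphabet.contains ch || ch == replace_char then ch
  else if PySem.Str.isIn ch "ACGTU" then
    if alphabet.contains "U" && ch == "T" then "U"
    else if alphabet.contains "T" && ch == "U" then "T"
    else ch
  else replace_char

lemma pv_foldA (alphabet : List String) (r : String) (l : List Char) (acc : List String) :
    l.foldl (fun cleaned char =>
      let ch : String := String.ofList [char]
      if alphabet.contains ch || ch == r then cleaned ++ [ch]
      else if PySem.Str.isIn ch "ACGTU" then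
        if alphabet.contains "U" && ch == "T" then cleaned ++ ["U"]
        else if alphabet.contains "T" && ch == "U" then cleaned ++ ["T"]
        else cleaned ++ [ch]
      else cleaned ++ [r]) acc = acc ++ l.map (pvGA alphabet r) := by
  induction l generalizing acc with
  | nil => simp
  | cons c l ih =>
      rw [List.foldl_cons, ih, List.map_cons]
      dsimp only [pvGA]
      split_ifs <;> simp

-- B's per-character decision chain computes exactly A's cascade
lemma pvMapChar_eq_pvGA (alphabet : List String) (r : String) (c : Char) :
    pvMapChar alphabet r c = pvGA alphabet r c := by
  unfold pvMapChar pvGA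
  dsimp only
  have hT : String.ofList [c] = "T" ↔ c = 'T' := by
    constructor
    · intro h; simpa using congrArg String.toList h
    · intro h; rw [h]
  have hU : String.ofList [c] = "U" ↔ c = 'U' := by
    constructor
    · intro h; simpa using congrArg String.toList h
    · intro h; rw [h]
  have hIn : PySem.Str.isIn (String.ofList [c]) "ACGTU" = true ↔ c ∈ "ACGTU".toList := by
    rw [PySem.Str.isIn_iff_infix]
    simp [List.singleton_infix_iff]
  by_cases h0 : (alphabet.contains (String.ofList [c]) || String.ofList [c] == r) = true
  · rw [if_pos h0, if_pos h0]
  · rw [if_neg h0, if_neg h0]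
    by_cases hcT : c = 'T'
    · subst hcT
      have h1 : PySem.Str.isIn (String.ofList ['T']) "ACGTU" = true := hIn.mpr (by decide)
      have h1c : PySem.Chars.isIn ['T'] ['A', 'C', 'G', 'T', 'U'] = true := by decide
      rw [if_pos h1]
      have h2 : (String.ofList ['T'] == "T") = true := by simp [hT.mpr rfl]
      have h3 : (String.ofList ['T'] == "U") = false := by
        simp only [beq_eq_false_iff_ne, ne_eq, hU]; decide
      by_cases hu : alphabet.contains "U" = true
      · simp [h3, h1c]
      · simp [h3, h1c]
    · by_cases hcU : c = 'U'
      · subst hcU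
        have h1 : PySem.Str.isIn (String.ofList ['U']) "ACGTU" = true := hIn.mpr (by decide)
        have h1c : PySem.Chars.isIn ['U'] ['A', 'C', 'G', 'T', 'U'] = true := by decide
        rw [if_pos h1]
        have h2 : (String.ofList ['U'] == "U") = true := by simp [hU.mpr rfl]
        have h3 : (String.ofList ['U'] == "T") = false := by
          simp only [beq_eq_false_iff_ne, ne_eq, hT]; decide
        by_cases ht : alphabet.contains "T" = true
        · simp [h3, h1c]
        · simp [h3, h1c]
      · have h2 : (String.ofList [c] == "T") = false := by
          simp only [beq_eq_false_iff_ne, ne_eq, hT]; exact hcT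
        have h3 : (String.ofList [c] == "U") = false := by
          simp only [beq_eq_false_iff_ne, ne_eq, hU]; exact hcU
        simp only [h2, h3, Bool.false_and, if_neg (by simp : ¬ (false = true))]
        split_ifs with h4 <;> first | rfl | simp_all

-- sep = "" joining is list concatenation on the code points
lemma pv_join_nil_toList (xs : List String) :
    (PySem.Str.join "" xs).toList = (xs.map String.toList).flatten := by
  rw [PySem.Str.toList_join]
  induction xs with
  | nil => simp [PySem.Chars.join_nil]
  | cons x xs ih =>
      cases xs with
      | nil => simp [PySem.Chars.join_singleton]
      | cons y ys => simp_all [PySem.Chars.join_cons_cons]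

-- every character of a maximal run maps to the head's image
lemma pv_map_takeWhile (f : Char → String) (c : Char) (l : List Char) :
    (l.takeWhile (fun d => d == c)).map f = List.replicate (l.takeWhile (fun d => d == c)).length (f c) := by
  have hmem : ∀ b ∈ (l.takeWhile (fun d => d == c)).map f, b = f c := by
    intro x hx
    obtain ⟨d, hd, rfl⟩ := List.mem_map.mp hx
    have hdc : (d == c) = true := List.mem_takeWhile_imp (p := fun d => d == c) (l := l) hd
    rw [show d = c from by simpa using hdc]
  simpa using List.eq_replicate_of_mem hmem

-- run-length emission flattens to the per-character map
lemma pv_runs_flatten (alphabet : List String) (r : String) :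
    ∀ (n : Nat) (l : List Char), l.length ≤ n →
      ((pvRuns alphabet r l).map String.toList).flatten
        = ((l.map (pvGA alphabet r)).map String.toList).flatten := by
  intro n
  induction n with
  | zero =>
      intro l hl
      have : l = [] := List.eq_nil_of_length_eq_zero (Nat.le_zero.mp hl)
      subst this; simp [pvRuns]
  | succ n ih =>
      intro l hl
      cases l with
      | nil => simp [pvRuns]
      | cons c rest =>
          rw [pvRuns]
          have hdrop : (rest.dropWhile (fun d => d == c)).length ≤ n := by
            have h1 := List.length_dropWhile_le (fun d => d == c) rest
            have h2 : rest.length ≤ n := by simpa using Nat.le_of_succ_le_succ hl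
            omega
          conv_rhs => rw [show (c :: rest)
            = c :: (rest.takeWhile (fun d => d == c) ++ rest.dropWhile (fun d => d == c)) from by
              rw [List.takeWhile_append_dropWhile]]
          simp only [List.map_cons, List.map_append, List.flatten_cons, List.flatten_append,
            pv_map_takeWhile (pvGA alphabet r) c rest, List.map_replicate]
          rw [ih _ hdrop, pvMapChar_eq_pvGA]
          unfold pvStrMul
          rw [Nat.add_comm 1 _, List.replicate_succ, List.flatten_cons]
          simp [List.append_assoc]

-- ===== VERDICT (by name: the statement is the Claim_ definition above) =====
theorem clean_sequence_py_spec : Claim_equal_clean_sequence_py := by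
  intro seq alphabet r _
  unfold Spec_clean_sequence_py clean_sequence_py clean_sequence_py_alt
  dsimp only
  rw [pv_foldA, List.nil_append]
  have h := pv_runs_flatten alphabet r (PySem.Str.upper seq).toList.length
      (PySem.Str.upper seq).toList (le_refl _)
  have hlist : (PySem.Str.join "" ((PySem.Str.upper seq).toList.map (pvGA alphabet r))).toList
      = (PySem.Str.join "" (pvRuns alphabet r (PySem.Str.upper seq).toList)).toList := by
    rw [pv_join_nil_toList, pv_join_nil_toList, h]
  exact String.toList_injective hlist
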